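-- pv_equiv track=rewrite | github.com/holysll/Leetcode | 0410_split-array-largest-sum.py | check
-- ===== SOURCE A (Python) =====
-- def check(nums, m, mid):
--     total = 0
--     for num in nums:
--         # 如果子序和 + 下一个数 超过分组阈值，则m-1
--         if total + num > mid:
--             m -= 1
--             if m <= 0:
--                 return False
--             # 下一个数 在下一个分组里面
--             total = num
--         else:
--             # 否则的话，继续加
--             total += num
--     return True
-- ===== SOURCE B (Python) =====
-- def check(nums, m, mid):
--     n = len(nums)
--     run = 0
--     prefix = [0]
--     for x in nums:
--         run += x
--         prefix.append(run)
--     # first group grows from an empty running sum, exactly as the greedy scan starts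
--     j = 0
--     while j < n and prefix[j + 1] - prefix[0] <= mid:
--         j += 1
--     groups = 1
--     s = j
--     while s < n:
--         # element s opens the next group unconditionally; extend while the group sum fits
--         j = s + 1
--         while j < n and prefix[j + 1] - prefix[s] <= mid:
--             j += 1
--         groups += 1
--         s = j
--     return groups <= m
-- ===== Notes on version B (the rewrite author's own statement) =====
-- stated objective: alternative
-- what changed: B precomputes a prefix-sum table and walks the array group-by-group with jump loops comparing prefix differences against the current group's fixed base, counting groups and comparing the count to m once at the end, instead of A's element-wise running-total accumulator that decrements m and early-returns; Pre_ excludes only inputs with m <= 0 whose nonempty prefix sums all stay <= mid, where A's decrement-then-test loop accidentally returns True.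
-- outside the precondition, e.g. on check([1], 0, 5): A returns True, B returns False; on check([], -1, 0): A returns True, B returns False
import Mathlib
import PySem

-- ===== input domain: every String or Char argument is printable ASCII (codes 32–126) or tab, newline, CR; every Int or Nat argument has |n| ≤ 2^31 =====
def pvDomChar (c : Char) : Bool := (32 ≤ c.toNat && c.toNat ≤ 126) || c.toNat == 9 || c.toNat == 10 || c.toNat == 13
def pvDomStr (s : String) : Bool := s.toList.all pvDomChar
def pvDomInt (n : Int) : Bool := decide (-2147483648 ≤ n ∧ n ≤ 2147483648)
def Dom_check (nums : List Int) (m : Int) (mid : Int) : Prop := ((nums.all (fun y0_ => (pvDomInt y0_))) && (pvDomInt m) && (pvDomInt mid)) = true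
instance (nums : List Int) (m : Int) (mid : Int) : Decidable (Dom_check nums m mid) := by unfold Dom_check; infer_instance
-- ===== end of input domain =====

-- B replaces A's element-wise running-total scan (which decrements m and early-returns)
-- by a prefix-sum table walked group-by-group with jump loops, counting groups and
-- comparing to m once at the end; objective: alternative structure, same O(n) cost.

-- ===== PORT A =====
def checkGo (l : List Int) (total : Int) (m : Int) (mid : Int) : Bool :=
  match l with
  | [] => true
  | num :: rest =>
    if total + num > mid then
      if m - 1 ≤ 0 then false
      else checkGo rest num (m - 1) mid
    else
      checkGo rest (total + num) m mid

def check (nums : List Int) (m : Int) (mid : Int) : Bool :=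
  checkGo nums 0 m mid

-- ===== PORT B =====
-- the prefix loop of Source B: running sum `run`, list starts as [0], append after each element
def buildPrefix (nums : List Int) : List Int :=
  (nums.foldl (fun (st : List Int × Int) x => (st.1 ++ [st.2 + x], st.2 + x)) ([0], 0)).1

-- the inner `while j < n and prefix[j+1] - base <= mid: j += 1` loop of Source B
def altExtend (pr : List Int) (n : Nat) (base : Int) (mid : Int) (j : Nat) : Nat :=
  if h : j < n ∧ pr.getD (j + 1) 0 - base ≤ mid then
    altExtend pr n base mid (j + 1)
  else j
termination_by n - j
decreasing_by omega

-- altExtend only increments its index (needed for altLoop's termination)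
theorem altExtend_ge (pr : List Int) (n : Nat) (base : Int) (mid : Int) (j : Nat) :
    j ≤ altExtend pr n base mid j := by
  unfold altExtend
  split
  · exact Nat.le_trans (Nat.le_succ j) (altExtend_ge pr n base mid (j + 1))
  · exact Nat.le_refl j
termination_by n - j
decreasing_by omega

-- the outer `while s < n` loop of Source B
def altLoop (pr : List Int) (n : Nat) (mid : Int) (s : Nat) (groups : Int) : Int :=
  if h : s < n then
    altLoop pr n mid (altExtend pr n (pr.getD s 0) mid (s + 1)) (groups + 1)
  else groups
termination_by n - s
decreasing_by
  have := altExtend_ge pr n (pr.getD s 0) mid (s + 1)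
  omega

def check_alt (nums : List Int) (m : Int) (mid : Int) : Bool :=
  let n := nums.length
  let pr := buildPrefix nums
  let j := altExtend pr n (pr.getD 0 0) mid 0
  let groups := altLoop pr n mid j 1
  decide (groups ≤ m)

-- ===== PRECONDITION & SPEC =====
-- Pre_ only excludes inputs with m ≤ 0 (a nonpositive part count, outside the problem's
-- natural domain) on which every nonempty prefix sum stays ≤ mid: there A's
-- decrement-then-test loop accidentally returns True, while B reports that even one
-- group already exceeds the allowance m.
def Pre_check (nums : List Int) (m : Int) (mid : Int) : Prop :=
  1 ≤ m ∨ ∃ k, k < nums.length + 1 ∧ 1 ≤ k ∧ mid < (nums.take k).sum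
instance (nums : List Int) (m : Int) (mid : Int) : Decidable (Pre_check nums m mid) := by unfold Pre_check; infer_instance

def pvWitness_check : List Int × Int × Int := ([7, 2, 5, 10, 8], 2, 18)

def Spec_check (nums : List Int) (m : Int) (mid : Int) (out : Bool) : Prop := out = check_alt nums m mid
instance (nums : List Int) (m : Int) (mid : Int) (out : Bool) : Decidable (Spec_check nums m mid out) := by unfold Spec_check; infer_instance

-- ===== CLAIM (what is proved, stated in full; the proofs are below) =====
def Claim_equal_check : Prop := ∀ (nums : List Int) (m : Int) (mid : Int), Dom_check nums m mid → Pre_check nums m mid → Spec_check nums m mid (check nums m mid)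

-- ===== LEMMAS AND PROOFS =====

-- greedy trigger counter: the common yardstick both programs are reduced to
def countGo (l : List Int) (total : Int) (mid : Int) : Int :=
  match l with
  | [] => 0
  | num :: rest =>
    if total + num > mid then 1 + countGo rest num mid
    else countGo rest (total + num) mid

theorem countGo_nonneg (l : List Int) (total mid : Int) : 0 ≤ countGo l total mid := by
  induction l generalizing total with
  | nil => simp [countGo]
  | cons x r ih =>
    simp only [countGo]
    split
    · have := ih x; omega
    · exact ih (total + x)

-- A-side: checkGo answers "fewer than m triggers, or no trigger at all"
theorem checkGo_eq_count (l : List Int) (total m mid : Int) :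
    checkGo l total m mid = decide (countGo l total mid < m ∨ countGo l total mid = 0) := by
  induction l generalizing total m with
  | nil => simp [checkGo, countGo]
  | cons x r ih =>
    simp only [checkGo, countGo]
    split
    · have hnn := countGo_nonneg r x mid
      by_cases h1 : m - 1 ≤ 0
      · simp only [if_pos h1]
        have : ¬ (1 + countGo r x mid < m ∨ 1 + countGo r x mid = 0) := by omega
        simp [this]
      · simp only [if_neg h1]
        rw [ih x (m - 1)]
        rw [decide_eq_decide]
        omega
    · exact ih (total + x) m

-- no trigger means every nonempty prefix (from the running total) stays within mid
theorem countGo_zero_prefix (l : List Int) (total mid : Int) (h : countGo l total mid = 0)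
    (k : Nat) (hk1 : 1 ≤ k) (hk : k ≤ l.length) : total + (l.take k).sum ≤ mid := by
  induction l generalizing total k with
  | nil => simp at hk; omega
  | cons x r ih =>
    simp only [countGo] at h
    split at h
    · have := countGo_nonneg r x mid; omega
    · rename_i hx
      match k, hk1 with
      | 1, _ => simp; omega
      | (j + 2), _ =>
        simp only [List.take_succ_cons, List.sum_cons]
        have := ih (total + x) h (j + 1) (by omega) (by simpa using hk)
        omega

-- partial sums helper
def sumTo (nums : List Int) (k : Nat) : Int := (nums.take k).sum

def psums (run : Int) (l : List Int) : List Int :=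
  match l with
  | [] => []
  | x :: r => (run + x) :: psums (run + x) r

theorem foldl_psums (l : List Int) (pr : List Int) (run : Int) :
    l.foldl (fun (st : List Int × Int) x => (st.1 ++ [st.2 + x], st.2 + x)) (pr, run)
      = (pr ++ psums run l, run + l.sum) := by
  induction l generalizing pr run with
  | nil => simp [psums]
  | cons x r ih =>
    simp only [List.foldl, psums]
    rw [ih]
    simp
    ring

theorem psums_getD (l : List Int) (run : Int) (i : Nat) (hi : i < l.length) :
    (psums run l).getD i 0 = run + (l.take (i + 1)).sum := by
  induction l generalizing run i with
  | nil => simp at hi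
  | cons x r ih =>
    cases i with
    | zero => simp [psums]
    | succ k =>
      simp only [psums, List.getD_cons_succ, List.take_succ_cons, List.sum_cons]
      rw [ih (run + x) k (by simpa using hi)]
      ring

theorem buildPrefix_getD (nums : List Int) (i : Nat) (hi : i ≤ nums.length) :
    (buildPrefix nums).getD i 0 = sumTo nums i := by
  unfold buildPrefix sumTo
  rw [foldl_psums]
  cases i with
  | zero => simp
  | succ k =>
    have hk : k < nums.length := by omega
    rw [show ([(0 : Int)] ++ psums 0 nums) = 0 :: psums 0 nums from rfl,
      List.getD_cons_succ, psums_getD nums 0 k hk]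
    ring

theorem sumTo_succ (nums : List Int) (i : Nat) (hi : i < nums.length) :
    sumTo nums (i + 1) = sumTo nums i + nums.getD i 0 := by
  unfold sumTo
  rw [List.sum_take_succ nums i hi]
  simp [List.getD, List.getElem?_eq_getElem hi]

-- countGo on a suffix, via the jump returned by altExtend
theorem extend_spec (nums : List Int) (mid b : Int) (i : Nat) (hi : i ≤ nums.length) :
    countGo (nums.drop i) (sumTo nums i - b) mid =
      (if altExtend (buildPrefix nums) nums.length b mid i < nums.length then
        1 + countGo (nums.drop (altExtend (buildPrefix nums) nums.length b mid i + 1))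
              (nums.getD (altExtend (buildPrefix nums) nums.length b mid i) 0) mid
      else 0) := by
  by_cases hin : i < nums.length
  · have hdrop : nums.drop i = nums.getD i 0 :: nums.drop (i + 1) := by
      rw [List.drop_eq_getElem_cons hin]
      simp [List.getD, List.getElem?_eq_getElem hin]
    rw [hdrop]
    simp only [countGo]
    have hsum : sumTo nums i - b + nums.getD i 0 = sumTo nums (i + 1) - b := by
      have := sumTo_succ nums i hin; omega
    rw [altExtend]
    by_cases hc : sumTo nums (i + 1) - b ≤ mid
    · -- no trigger at i: loop advances
      have hguard : i < nums.length ∧ (buildPrefix nums).getD (i + 1) 0 - b ≤ mid := by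
        refine ⟨hin, ?_⟩
        rw [buildPrefix_getD nums (i + 1) (by omega)]
        exact hc
      rw [dif_pos hguard, if_neg (by omega)]
      rw [hsum]
      exact extend_spec nums mid b (i + 1) (by omega)
    · -- trigger at i: altExtend stops here
      have hguard : ¬ (i < nums.length ∧ (buildPrefix nums).getD (i + 1) 0 - b ≤ mid) := by
        rw [buildPrefix_getD nums (i + 1) (by omega)]
        tauto
      rw [dif_neg hguard, if_pos (by omega), if_pos hin]
  · have hieq : i = nums.length := by omega
    have h1 : nums.drop i = [] := by simp [hieq]
    have h2 : altExtend (buildPrefix nums) nums.length b mid i = i := by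
      rw [altExtend, dif_neg]; omega
    rw [h1, h2, if_neg (by omega)]
    simp [countGo]
termination_by nums.length - i
decreasing_by omega

theorem altExtend_le (pr : List Int) (n : Nat) (base mid : Int) (j : Nat) (hj : j ≤ n) :
    altExtend pr n base mid j ≤ n := by
  rw [altExtend]
  split
  · exact altExtend_le pr n base mid (j + 1) (by omega)
  · exact hj
termination_by n - j
decreasing_by omega

-- the outer loop counts 1 group per jump
theorem loop_spec (nums : List Int) (mid : Int) (s : Nat) (g : Int) (hs : s ≤ nums.length) :
    altLoop (buildPrefix nums) nums.length mid s g =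
      g + (if s < nums.length then 1 + countGo (nums.drop (s + 1)) (nums.getD s 0) mid else 0) := by
  rw [altLoop]
  by_cases h : s < nums.length
  · rw [dif_pos h, if_pos h]
    have hb : (buildPrefix nums).getD s 0 = sumTo nums s := buildPrefix_getD nums s (by omega)
    rw [hb]
    have hle : altExtend (buildPrefix nums) nums.length (sumTo nums s) mid (s + 1) ≤ nums.length :=
      altExtend_le _ _ _ _ _ (by omega)
    rw [loop_spec nums mid _ (g + 1) hle]
    have hx : nums.getD s 0 = sumTo nums (s + 1) - sumTo nums s := by
      have := sumTo_succ nums s h; omega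
    rw [hx, ← extend_spec nums mid (sumTo nums s) (s + 1) (by omega)]
    ring
  · rw [dif_neg h, if_neg h]
    ring
termination_by nums.length - s
decreasing_by
  have := altExtend_ge (buildPrefix nums) nums.length (sumTo nums s) mid (s + 1)
  omega

-- B computes 1 + (number of greedy triggers)
theorem check_alt_eq_count (nums : List Int) (m mid : Int) :
    check_alt nums m mid = decide (1 + countGo nums 0 mid ≤ m) := by
  unfold check_alt
  simp only []
  have h0 : (buildPrefix nums).getD 0 0 = (0 : Int) := by
    rw [buildPrefix_getD nums 0 (by omega)]; simp [sumTo]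
  rw [h0]
  have hle : altExtend (buildPrefix nums) nums.length 0 mid 0 ≤ nums.length :=
    altExtend_le _ _ _ _ _ (by omega)
  rw [loop_spec nums mid _ 1 hle]
  have := extend_spec nums mid 0 0 (by omega)
  simp only [List.drop_zero] at this
  have hz : sumTo nums 0 - 0 = (0 : Int) := by simp [sumTo]
  rw [hz] at this
  rw [← this]

-- ===== VERDICT (by name: the statement is the Claim_ definition above) =====
theorem check_spec : Claim_equal_check := by
  intro nums m mid _ hpre
  unfold Spec_check
  unfold Pre_check at hpre
  rw [check_alt_eq_count]
  unfold check
  rw [checkGo_eq_count nums 0 m mid]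
  rw [decide_eq_decide]
  have hc0 := countGo_nonneg nums 0 mid
  by_cases hz : countGo nums 0 mid = 0
  · have hm : 1 ≤ m := by
      rcases hpre with hm | ⟨k, hk, hk1, hks⟩
      · exact hm
      · exfalso
        have := countGo_zero_prefix nums 0 mid hz k hk1 (by omega)
        omega
    omega
  · omega
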